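-- pv_equiv track=rewrite | github.com/beckyycode/Python-practice | lib.py | basepaircounter
-- ===== SOURCE A (Python) =====
-- def basepaircounter (inputdata):
--     """
--     Docstring for basepaircounter
--
--     :param inputdata: Input a DNA/RNA sequence to find it's length
--     """
--
--     total_a = 0
--     total_t = 0
--     total_g = 0
--     total_c = 0
--     #^^^^ this has to come before the for loop or they will keep getting reset at zero every time it loops
--
--     for character in inputdata:
--
--         if character == "a":
--             total_a = total_a + 1
--         elif character == "t":
--             total_t = total_t + 1
--         elif character == "g":
--             total_g = total_g + 1
--         elif character == "c":
--             total_c = total_c + 1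
--         #^^^ this must be indented to be IN the for loop, if it isn't indented it will come "after" the for loop
--
--     return "A:", total_a, "T:", total_t, "C:", total_c, "G:", total_g
-- ===== SOURCE B (Python) =====
-- def basepaircounter(inputdata):
--     """Count bases by four independent scans (list.count) instead of one
--     accumulator loop with an if/elif chain."""
--     seq = list(inputdata)
--     return "A:", seq.count("a"), "T:", seq.count("t"), "C:", seq.count("c"), "G:", seq.count("g")
-- ===== Notes on version B (the rewrite author's own statement) =====
-- stated objective: simpler
-- what changed: Replaces the single stateful loop with four scalar accumulators and an if/elif chain by four independent list.count scans, one per base, with no per-character branching or accumulator state.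
import Mathlib
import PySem

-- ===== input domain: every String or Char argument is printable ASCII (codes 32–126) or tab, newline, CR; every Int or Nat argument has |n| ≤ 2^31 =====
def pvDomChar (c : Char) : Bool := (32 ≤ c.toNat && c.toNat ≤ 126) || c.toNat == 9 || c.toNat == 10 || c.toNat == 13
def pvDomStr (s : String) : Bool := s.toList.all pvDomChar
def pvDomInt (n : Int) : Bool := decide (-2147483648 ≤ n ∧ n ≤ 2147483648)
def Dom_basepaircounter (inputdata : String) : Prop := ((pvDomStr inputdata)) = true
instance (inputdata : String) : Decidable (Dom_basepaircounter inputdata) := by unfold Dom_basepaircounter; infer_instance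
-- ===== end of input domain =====

-- B replaces A's single stateful loop (four accumulators, if/elif chain) by four independent list.count scans (simpler).

-- ===== PORT A =====
-- four accumulators updated by an if/elif chain over the characters
def basepaircounter (inputdata : String) : String × Int × String × Int × String × Int × String × Int :=
  let st := inputdata.toList.foldl
    (fun (st : Int × Int × Int × Int) character =>
      if character == 'a' then (st.1 + 1, st.2.1, st.2.2.1, st.2.2.2)
      else if character == 't' then (st.1, st.2.1 + 1, st.2.2.1, st.2.2.2)
      else if character == 'g' then (st.1, st.2.1, st.2.2.1 + 1, st.2.2.2)
      else if character == 'c' then (st.1, st.2.1, st.2.2.1, st.2.2.2 + 1)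
      else (st.1, st.2.1, st.2.2.1, st.2.2.2))
    (0, 0, 0, 0)
  ("A:", st.1, "T:", st.2.1, "C:", st.2.2.2, "G:", st.2.2.1)

-- ===== PORT B =====
-- seq = list(inputdata); four independent seq.count scans (list.count → PySem.List.count)
def basepaircounter_alt (inputdata : String) : String × Int × String × Int × String × Int × String × Int :=
  let seq := inputdata.toList
  ("A:", PySem.List.count seq 'a', "T:", PySem.List.count seq 't',
   "C:", PySem.List.count seq 'c', "G:", PySem.List.count seq 'g')

-- ===== PRECONDITION & SPEC =====
def Spec_basepaircounter (inputdata : String) (out : String × Int × String × Int × String × Int × String × Int) : Prop := out = basepaircounter_alt inputdata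
-- default instance search stops one Prod level short on this 8-tuple; assemble the DecidableEq term explicitly
def pvOutDecEq : DecidableEq (String × Int × String × Int × String × Int × String × Int) :=
  @instDecidableEqProd _ _ _ (@instDecidableEqProd _ _ _ (@instDecidableEqProd _ _ _
    (@instDecidableEqProd _ _ _ (@instDecidableEqProd _ _ _ (@instDecidableEqProd _ _ _
      (@instDecidableEqProd _ _ _ inferInstance))))))
instance (inputdata : String) (out : String × Int × String × Int × String × Int × String × Int) : Decidable (Spec_basepaircounter inputdata out) := by unfold Spec_basepaircounter; exact pvOutDecEq out (basepaircounter_alt inputdata)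

-- ===== CLAIM (what is proved, stated in full; the proofs are below) =====
def Claim_equal_basepaircounter : Prop := ∀ (inputdata : String), Dom_basepaircounter inputdata → Spec_basepaircounter inputdata (basepaircounter inputdata)

-- ===== LEMMAS AND PROOFS =====

-- loop invariant for A's fold: each component accumulates the count of its character
theorem basepaircounter_fold (l : List Char) (a t g c : Int) :
    l.foldl
      (fun (st : Int × Int × Int × Int) character =>
        if character == 'a' then (st.1 + 1, st.2.1, st.2.2.1, st.2.2.2)
        else if character == 't' then (st.1, st.2.1 + 1, st.2.2.1, st.2.2.2)
        else if character == 'g' then (st.1, st.2.1, st.2.2.1 + 1, st.2.2.2)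
        else if character == 'c' then (st.1, st.2.1, st.2.2.1, st.2.2.2 + 1)
        else (st.1, st.2.1, st.2.2.1, st.2.2.2))
      (a, t, g, c)
    = (a + l.count 'a', t + l.count 't', g + l.count 'g', c + l.count 'c') := by
  induction l generalizing a t g c with
  | nil => simp
  | cons x xs ih =>
    simp only [List.foldl_cons]
    by_cases hx : x = 'a' <;> by_cases ht : x = 't' <;> by_cases hg : x = 'g' <;> by_cases hc : x = 'c' <;>
      simp_all <;> ring_nf

-- ===== VERDICT (by name: the statement is the Claim_ definition above) =====
theorem basepaircounter_spec : Claim_equal_basepaircounter := by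
  intro s _
  show _ = _
  unfold basepaircounter basepaircounter_alt
  rw [basepaircounter_fold]
  simp [PySem.List.count_eq]
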